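-- pv_equiv track=rewrite | github.com/pennyworth-tech/agent-arborist | tests/test_hooks_advanced.py | _extract_yaml
-- ===== SOURCE A (Python) =====
-- def _extract_yaml(output: str) -> str:
--     """Extract YAML content from CLI output."""
--     lines = output.split("\n")
--     yaml_start = None
--     for i, line in enumerate(lines):
--         if line.startswith("name:"):
--             yaml_start = i
--             break
--     if yaml_start is None:
--         return ""
--     return "\n".join(lines[yaml_start:])
-- ===== SOURCE B (Python) =====
-- def _extract_yaml(output: str) -> str:
--     """Extract YAML content from CLI output."""
--     if output.startswith("name:"):
--         return output
--     i = output.find("\nname:")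
--     if i == -1:
--         return ""
--     return output[i + 1:]
-- ===== Notes on version B (the rewrite author's own statement) =====
-- stated objective: simpler
-- what changed: B never splits the output into a list of lines: it checks the YAML marker prefix at the start of the string and otherwise locates the first newline-anchored occurrence of the marker with a single substring find and slices the original string there, instead of A's split/enumerate-loop/rejoin.
import Mathlib
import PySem

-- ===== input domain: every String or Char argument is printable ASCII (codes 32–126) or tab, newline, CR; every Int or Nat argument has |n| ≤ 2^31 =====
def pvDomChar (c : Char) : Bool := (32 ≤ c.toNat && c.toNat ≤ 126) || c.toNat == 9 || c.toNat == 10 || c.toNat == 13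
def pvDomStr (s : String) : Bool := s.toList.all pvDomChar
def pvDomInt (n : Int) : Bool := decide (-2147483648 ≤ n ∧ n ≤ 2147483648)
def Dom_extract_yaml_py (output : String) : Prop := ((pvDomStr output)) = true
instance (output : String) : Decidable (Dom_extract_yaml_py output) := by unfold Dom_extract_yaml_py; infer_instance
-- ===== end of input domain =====

-- B replaces A's split-into-lines loop by a prefix check plus one find of "\nname:" and a slice: simpler, no line list.

-- ===== PORT A =====
-- the 'for i, line in enumerate(lines): if line.startswith("name:"): yaml_start = i; break' loop
def pyAFindLoop (pairs : List (Int × String)) : Option Int :=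
  match pairs with
  | [] => none
  | (i, line) :: rest => if PySem.Str.startswith line "name:" then some i else pyAFindLoop rest

def extract_yaml_py (output : String) : String :=
  let lines := (PySem.Str.split? output "\n").getD []   -- sep "\n" ≠ "", so split? is always some
  match pyAFindLoop (PySem.List.enumerate lines) with
  | none => ""
  | some i => PySem.Str.join "\n" (PySem.List.slice lines (some i) none)

-- ===== PORT B =====
def extract_yaml_py_alt (output : String) : String :=
  if PySem.Str.startswith output "name:" then output
  else
    let i := PySem.Str.find output "\nname:"
    if i == -1 then ""
    else String.ofList (PySem.Chars.slice output.toList (some (i + 1)) none)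

-- ===== PRECONDITION & SPEC =====
def Spec_extract_yaml_py (output : String) (out : String) : Prop := out = extract_yaml_py_alt output
instance (output : String) (out : String) : Decidable (Spec_extract_yaml_py output out) := by unfold Spec_extract_yaml_py; infer_instance

-- ===== CLAIM (what is proved, stated in full; the proofs are below) =====
def Claim_equal_extract_yaml_py : Prop := ∀ (output : String), Dom_extract_yaml_py output → Spec_extract_yaml_py output (extract_yaml_py output)

-- ===== LEMMAS AND PROOFS =====

-- the fixed patterns
def nameKey : List Char := ['n', 'a', 'm', 'e', ':']
def nlName : List Char := '\n' :: nameKey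

theorem key_eq : "name:".toList = nameKey := by decide
theorem nl_eq : "\nname:".toList = nlName := by decide

-- char-level core of port A
def firstNameIdx : List (List Char) → Option Nat
  | [] => none
  | l :: ls => if nameKey.isPrefixOf l then some 0 else (firstNameIdx ls).map (· + 1)

def coreA (cs : List Char) : List Char :=
  match firstNameIdx (cs.splitOn '\n') with
  | none => []
  | some j => PySem.Chars.join ['\n'] ((cs.splitOn '\n').drop j)

-- char-level core of port B
def coreB (cs : List Char) : List Char :=
  if nameKey.isPrefixOf cs then cs
  else if PySem.Chars.find cs nlName == -1 then []
  else PySem.Chars.slice cs (some (PySem.Chars.find cs nlName + 1)) none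

-- PySem.Chars.splitOn with a one-char separator is Mathlib's List.splitOn
theorem splitOn_go_eq (c : Char) (fuel : Nat) (l cur : List Char) (acc : List (List Char)) (h : l.length ≤ fuel) :
    PySem.Chars.splitOn.go [c] fuel l cur acc
      = acc.reverse ++ (List.splitOnP (· == c) l).modifyHead (cur.reverse ++ ·) := by
  induction fuel generalizing l cur acc with
  | zero =>
    have hl : l = [] := by simpa using List.eq_nil_of_length_eq_zero (Nat.le_zero.mp h)
    subst hl
    simp [PySem.Chars.splitOn.go, List.splitOnP_nil]
  | succ fuel ih =>
    cases l with
    | nil => simp [PySem.Chars.splitOn.go, List.splitOnP_nil]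
    | cons a rest =>
      rw [PySem.Chars.splitOn.go]
      by_cases hac : a = c
      · subst hac
        have hpre : [a].isPrefixOf (a :: rest) = true := by simp [List.isPrefixOf]
        rw [if_pos hpre]
        simp only [List.length_singleton, List.drop_one, List.tail_cons]
        rw [ih rest [] (cur.reverse :: acc) (by simpa using Nat.le_of_succ_le_succ h)]
        simp [List.splitOnP_cons]
        show List.modifyHead id _ = _
        rw [List.modifyHead_id]; rfl
      · have hpre : [c].isPrefixOf (a :: rest) = false := by
          simp [List.isPrefixOf]
          intro hh; exact absurd hh.symm hac
        rw [if_neg (by simp [hpre])]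
        rw [ih rest (a :: cur) acc (by simpa using Nat.le_of_succ_le_succ h)]
        rw [List.splitOnP_cons]
        rw [if_neg (by simp [hac])]
        obtain ⟨hd, tl, he⟩ := List.exists_cons_of_ne_nil (List.splitOnP_ne_nil (· == c) rest)
        rw [he]
        simp

theorem pysplitOn_eq (cs : List Char) (c : Char) :
    PySem.Chars.splitOn cs [c] = cs.splitOn c := by
  rw [PySem.Chars.splitOn, splitOn_go_eq c (cs.length + 1) cs [] [] (by omega)]
  simp [List.splitOn]
  show List.modifyHead id _ = _
  rw [List.modifyHead_id]; rfl

-- splitOn structural facts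
theorem splitOn_no_sep (cs : List Char) (h : '\n' ∉ cs) : cs.splitOn '\n' = [cs] := by
  induction cs with
  | nil => rfl
  | cons a rest ih =>
    have ha : a ≠ '\n' := fun e => h (e ▸ List.mem_cons_self)
    rw [List.splitOn] at *
    rw [List.splitOnP_cons, if_neg (by simp [ha]), ih (fun m => h (List.mem_cons_of_mem a m))]
    rfl

theorem splitOn_break (l rest : List Char) (h : '\n' ∉ l) :
    (l ++ '\n' :: rest).splitOn '\n' = l :: rest.splitOn '\n' := by
  induction l with
  | nil =>
    rw [List.splitOn, List.nil_append, List.splitOnP_cons, if_pos (by simp)]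
    rfl
  | cons a l' ih =>
    have ha : a ≠ '\n' := fun e => h (e ▸ List.mem_cons_self)
    rw [List.splitOn] at *
    rw [List.cons_append, List.splitOnP_cons, if_neg (by simp [ha]),
      ih (fun m => h (List.mem_cons_of_mem a m))]
    rfl

-- "name:" is a prefix of (l ++ '\n' :: rest) iff it is a prefix of l ("name:" has no newline)
theorem prefix_transfer (l rest : List Char) :
    nameKey <+: (l ++ '\n' :: rest) ↔ nameKey <+: l := by
  constructor
  · intro hp
    by_cases hlen : nameKey.length ≤ l.length
    · rw [List.prefix_iff_eq_take] at hp ⊢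
      conv_lhs => rw [hp, List.take_append_of_le_length hlen]
    · exfalso
      push Not at hlen
      have hidx : l.length < (l ++ '\n' :: rest).length := by simp
      have : nameKey[l.length]'(by omega) = (l ++ '\n' :: rest)[l.length]'hidx :=
        hp.getElem (by omega)
      rw [List.getElem_append_right (Nat.le_refl _)] at this
      simp at this
      have : '\n' ∈ nameKey := this ▸ List.getElem_mem _
      revert this; decide
  · intro hp; exact hp.trans (List.prefix_append _ _)

-- no occurrence of "\nname:" can start inside the newline-free first line
theorem no_occ_in_line (l rest : List Char) (h : '\n' ∉ l) (i : Nat) (hi : i < l.length) :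
    ¬ nlName <+: (l ++ '\n' :: rest).drop i := by
  intro hp
  have hh : ((l ++ '\n' :: rest).drop i).head? = some '\n' := by
    obtain ⟨t, ht⟩ := hp
    rw [← ht]; rfl
  rw [List.head?_drop] at hh
  rw [List.getElem?_append_left hi] at hh
  have : '\n' ∈ l := by
    obtain ⟨hl, he⟩ := List.getElem?_eq_some_iff.mp hh
    exact he ▸ List.getElem_mem _
  exact h this

-- uniqueness characterization of Chars.find
theorem find_eq_of (s sub : List Char) (n : Nat) (h1 : sub <+: s.drop n)
    (h2 : ∀ i < n, ¬ sub <+: s.drop i) : PySem.Chars.find s sub = n := by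
  have hinf : sub <:+: s := by
    have h3 : s.drop n <:+ s := List.drop_suffix n s
    exact h1.isInfix.trans h3.isInfix
  have hnn : 0 ≤ PySem.Chars.find s sub := (PySem.Chars.find_nonneg_iff s sub).mpr hinf
  obtain ⟨hpre, hmin⟩ := PySem.Chars.find_spec hnn
  set f := (PySem.Chars.find s sub).toNat with hf
  have : f = n := by
    rcases Nat.lt_trichotomy f n with hlt | heq | hgt
    · exact absurd hpre (h2 f hlt)
    · exact heq
    · exact absurd h1 (hmin n hgt)
  omega

-- A's loop over enumerate(lines) is firstNameIdx shifted by the start index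
theorem loop_eq (X : List (List Char)) (k : Int) :
    pyAFindLoop (PySem.List.enumerate (X.map String.ofList) k)
      = (firstNameIdx X).map (fun (j : Nat) => k + (j : Int)) := by
  induction X generalizing k with
  | nil => simp [pyAFindLoop, firstNameIdx, PySem.List.enumerate_nil]
  | cons l ls ih =>
    rw [List.map_cons, PySem.List.enumerate_cons, pyAFindLoop, firstNameIdx]
    rw [PySem.Str.startswith_eq, key_eq, String.toList_ofList, PySem.Chars.startswith]
    by_cases h : nameKey.isPrefixOf l
    · rw [if_pos h, if_pos h]; simp
    · rw [if_neg h, if_neg h, ih]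
      cases firstNameIdx ls <;> simp <;> omega

theorem lines_eq (s : String) :
    (PySem.Str.split? s "\n").getD [] = (s.toList.splitOn '\n').map String.ofList := by
  have h := PySem.Str.split?_map s "\n"
  rw [show "\n".toList = ['\n'] from rfl] at h
  rw [PySem.Chars.split?] at h
  rw [if_neg (by decide)] at h
  rw [pysplitOn_eq] at h
  cases he : PySem.Str.split? s "\n" with
  | none => rw [he] at h; simp at h
  | some L =>
    rw [he] at h
    simp only [Option.map_some, Option.some.injEq] at h
    rw [Option.getD_some, ← h, List.map_map]
    simp [Function.comp_def]

-- the port of A computes coreA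
theorem portA_eq (s : String) : extract_yaml_py s = String.ofList (coreA s.toList) := by
  rw [extract_yaml_py]
  simp only [lines_eq s]
  rw [loop_eq _ 0, coreA]
  cases hf : firstNameIdx (s.toList.splitOn '\n') with
  | none => simp
  | some j =>
    simp only [Option.map_some]
    have hz : ((0 : Int) + j) = (j : Int) := by omega
    rw [hz]
    rw [PySem.List.slice_from _ (by positivity)]
    rw [Int.toNat_natCast]
    rw [← List.map_drop]
    conv_lhs => rw [show PySem.Str.join "\n" ((List.drop j (s.toList.splitOn '\n')).map String.ofList)
      = String.ofList ((PySem.Str.join "\n" ((List.drop j (s.toList.splitOn '\n')).map String.ofList)).toList) from String.ofList_toList.symm]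
    rw [PySem.Str.toList_join]
    rw [List.map_map]
    simp [Function.comp_def]

-- the port of B computes coreB
theorem portB_eq (s : String) : extract_yaml_py_alt s = String.ofList (coreB s.toList) := by
  rw [extract_yaml_py_alt, coreB]
  rw [PySem.Str.startswith_eq, PySem.Chars.startswith, key_eq]
  by_cases h1 : nameKey.isPrefixOf s.toList
  · rw [if_pos h1, if_pos h1, String.ofList_toList]
  · rw [if_neg (by simpa using h1), if_neg h1]
    simp only [PySem.Str.find_eq, nl_eq]
    by_cases h2 : PySem.Chars.find s.toList nlName = -1
    · rw [if_pos (by simpa using h2), if_pos (by simpa using h2)]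
    · rw [if_neg (by simpa using h2), if_neg (by simpa using h2)]

-- decomposing a string at its first newline
theorem decomp (cs : List Char) (h : '\n' ∈ cs) :
    ∃ l rest, '\n' ∉ l ∧ cs = l ++ '\n' :: rest := by
  have hd : cs.dropWhile (· ≠ '\n') ≠ [] := by
    intro he
    have : cs.takeWhile (· ≠ '\n') = cs := by
      have := List.takeWhile_append_dropWhile (p := (· ≠ '\n')) (l := cs)
      rw [he, List.append_nil] at this; exact this
    have hm : '\n' ∈ cs.takeWhile (· ≠ '\n') := by rw [this]; exact h
    have := List.mem_takeWhile_imp hm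
    simp at this
  refine ⟨cs.takeWhile (· ≠ '\n'), (cs.dropWhile (· ≠ '\n')).tail, ?_, ?_⟩
  · intro hm
    have := List.mem_takeWhile_imp hm
    simp at this
  · have hh : (cs.dropWhile (· ≠ '\n')).head hd = '\n' := by
      have := List.head_dropWhile_not (· ≠ '\n') hd
      simpa using this
    conv_lhs => rw [← List.takeWhile_append_dropWhile (p := (· ≠ '\n')) (l := cs),
      ← List.cons_head_tail hd, hh]

-- skipping the newline-free first line on A's side
theorem coreA_skip (l rest : List Char) (hl : '\n' ∉ l) (hp : ¬ nameKey <+: (l ++ '\n' :: rest)) :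
    coreA (l ++ '\n' :: rest) = coreA rest := by
  have hnp : ¬ nameKey.isPrefixOf l := by
    rw [List.isPrefixOf_iff_prefix]
    intro hc; exact hp ((prefix_transfer l rest).mpr hc)
  rw [coreA, coreA, splitOn_break l rest hl]
  rw [show firstNameIdx (l :: rest.splitOn '\n')
      = (firstNameIdx (rest.splitOn '\n')).map (· + 1) from by rw [firstNameIdx, if_neg hnp]]
  cases firstNameIdx (rest.splitOn '\n') with
  | none => rfl
  | some j => simp

theorem beq_neg_one_false (n : Nat) (x : Int) (hx : x = n) : (x == -1) = false := by
  subst hx; simp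

-- skipping the newline-free first line on B's side
theorem coreB_skip (l rest : List Char) (hl : '\n' ∉ l) (hp : ¬ nameKey <+: (l ++ '\n' :: rest)) :
    coreB (l ++ '\n' :: rest) = coreB rest := by
  have hnp : ¬ nameKey.isPrefixOf (l ++ '\n' :: rest) := by
    rw [List.isPrefixOf_iff_prefix]; exact hp
  have hdl : (l ++ '\n' :: rest).drop l.length = '\n' :: rest := List.drop_left
  have hdrop : ∀ k : Nat, (l ++ '\n' :: rest).drop (l.length + 1 + k) = rest.drop k := by
    intro k
    rw [List.drop_append]
    rw [List.drop_eq_nil_of_le (by omega), List.nil_append]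
    rw [show l.length + 1 + k - l.length = k + 1 from by omega, List.drop_succ_cons]
  by_cases hr : nameKey <+: rest
  · have hf : PySem.Chars.find (l ++ '\n' :: rest) nlName = l.length := by
      apply find_eq_of
      · rw [hdl, nlName]; exact List.cons_prefix_cons.mpr ⟨rfl, hr⟩
      · exact fun i hi => no_occ_in_line l rest hl i hi
    rw [coreB, if_neg hnp, hf, beq_neg_one_false l.length _ rfl]
    simp only [Bool.false_eq_true, if_false]
    rw [PySem.Chars.slice_eq_listSlice, PySem.List.slice_from _ (by omega)]
    rw [show ((l.length : Int) + 1).toNat = l.length + 1 + 0 from by omega, hdrop 0]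
    rw [coreB, if_pos (List.isPrefixOf_iff_prefix.mpr hr), List.drop_zero]
  · have hrp : ¬ nameKey.isPrefixOf rest := by rw [List.isPrefixOf_iff_prefix]; exact hr
    have hocc : ∀ j : Nat, nlName <+: (l ++ '\n' :: rest).drop j → ∃ k, nlName <+: rest.drop k := by
      intro j hj
      rcases Nat.lt_trichotomy j l.length with h1 | h1 | h1
      · exact absurd hj (no_occ_in_line l rest hl j h1)
      · subst h1; rw [hdl] at hj
        exact absurd (List.cons_prefix_cons.mp hj).2 hr
      · refine ⟨j - l.length - 1, ?_⟩
        rw [show j = l.length + 1 + (j - l.length - 1) from by omega, hdrop] at hj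
        exact hj
    by_cases hfr : PySem.Chars.find rest nlName = -1
    · have hfc : PySem.Chars.find (l ++ '\n' :: rest) nlName = -1 := by
        rw [PySem.Chars.find_eq_neg_one_iff]
        intro hinf
        obtain ⟨j, hj⟩ := (PySem.Chars.exists_prefix_drop_iff_isIn nlName _).mpr
          ((PySem.Chars.isIn_iff_infix nlName _).mpr hinf)
        obtain ⟨k, hk⟩ := hocc j hj
        have : nlName <:+: rest := hk.isInfix.trans (List.drop_suffix k rest).isInfix
        exact (PySem.Chars.find_eq_neg_one_iff rest nlName).mp hfr this
      rw [coreB, if_neg hnp, hfc, coreB, if_neg hrp, hfr]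
      rfl
    · have h0 : 0 ≤ PySem.Chars.find rest nlName := by
        have := PySem.Chars.neg_one_le_find rest nlName; omega
      obtain ⟨hpre, hmin⟩ := PySem.Chars.find_spec h0
      set m := (PySem.Chars.find rest nlName).toNat with hm
      have hfc : PySem.Chars.find (l ++ '\n' :: rest) nlName = (l.length + 1 + m : Nat) := by
        apply find_eq_of
        · rw [hdrop m]; exact hpre
        · intro i hi hpi
          rcases Nat.lt_trichotomy i l.length with h1 | h1 | h1
          · exact no_occ_in_line l rest hl i h1 hpi
          · subst h1; rw [hdl] at hpi
            exact hr (List.cons_prefix_cons.mp hpi).2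
          · have hk : i - l.length - 1 < m := by omega
            rw [show i = l.length + 1 + (i - l.length - 1) from by omega, hdrop] at hpi
            exact hmin _ hk hpi
      rw [coreB, if_neg hnp, hfc, beq_neg_one_false _ _ rfl]
      simp only [Bool.false_eq_true, if_false]
      rw [coreB, if_neg hrp, beq_neg_one_false m _ (by omega)]
      simp only [Bool.false_eq_true, if_false]
      rw [PySem.Chars.slice_eq_listSlice, PySem.Chars.slice_eq_listSlice]
      rw [PySem.List.slice_from _ (by omega), PySem.List.slice_from _ (by omega)]
      rw [show (((l.length + 1 + m : Nat) : Int) + 1).toNat = l.length + 1 + (m + 1) from by omega,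
        hdrop]
      congr 1
      omega

theorem mainC (cs : List Char) : coreA cs = coreB cs := by
  by_cases hp : nameKey <+: cs
  · rw [coreB, if_pos (List.isPrefixOf_iff_prefix.mpr hp)]
    by_cases hnl : '\n' ∈ cs
    · obtain ⟨l, rest, hl, hdec⟩ := decomp cs hnl
      have hpl : nameKey.isPrefixOf l :=
        List.isPrefixOf_iff_prefix.mpr ((prefix_transfer l rest).mp (hdec ▸ hp))
      rw [coreA]
      rw [show firstNameIdx (cs.splitOn '\n') = some 0 from by
        rw [hdec, splitOn_break l rest hl, firstNameIdx, if_pos hpl]]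
      show PySem.Chars.join ['\n'] ((cs.splitOn '\n').drop 0) = cs
      rw [List.drop_zero, PySem.Chars.join]
      exact List.intercalate_splitOn cs '\n'
    · rw [coreA]
      rw [show firstNameIdx (cs.splitOn '\n') = some 0 from by
        rw [splitOn_no_sep cs hnl, firstNameIdx, if_pos (List.isPrefixOf_iff_prefix.mpr hp)]]
      show PySem.Chars.join ['\n'] ((cs.splitOn '\n').drop 0) = cs
      rw [List.drop_zero, splitOn_no_sep cs hnl, PySem.Chars.join_singleton]
  · by_cases hnl : '\n' ∈ cs
    · obtain ⟨l, rest, hl, hdec⟩ := decomp cs hnl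
      rw [hdec] at hp ⊢
      rw [coreA_skip l rest hl hp, coreB_skip l rest hl hp]
      exact mainC rest
    · rw [coreA]
      rw [show firstNameIdx (cs.splitOn '\n') = none from by
        rw [splitOn_no_sep cs hnl, firstNameIdx,
          if_neg (fun hc => hp (List.isPrefixOf_iff_prefix.mp hc))]
        rfl]
      rw [coreB, if_neg (fun hc => hp (List.isPrefixOf_iff_prefix.mp hc))]
      rw [show PySem.Chars.find cs nlName = -1 from by
        rw [PySem.Chars.find_eq_neg_one_iff]
        intro hinf
        exact hnl (hinf.sublist.mem (by decide))]
      rfl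
termination_by cs.length
decreasing_by
  rw [hdec]; simp; omega

-- ===== VERDICT (by name: the statement is the Claim_ definition above) =====
theorem extract_yaml_py_spec : Claim_equal_extract_yaml_py := by
  intro output _
  unfold Spec_extract_yaml_py
  rw [portA_eq, portB_eq, mainC]
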